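-- pv_equiv track=rewrite | github.com/shantanu1109/HackerEarth-Coding-Practice | Basic Programming/Implementation/Update the array/Update_the_array.py | min_updates
-- ===== SOURCE A (Python) =====
-- def min_updates(N, A, K):
--     # Check if N is odd, if so, it's not possible to proceed
--     if N % 2:
--         return -1
--
--     # Initialize counters and dictionaries to keep track of odd and even numbers
--     count_odd = 0
--     count_even = 0
--     req_odd = 0
--     req_even = 0
--     od = {}  # Dictionary to store occurrences of odd numbers
--     ev = {}  # Dictionary to store occurrences of even numbers
--
--     # Iterate through the list A
--     for i in range(N):
--         if A[i] % 2 and od.get(A[i], 0) == 0: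
--             # If the number is odd and hasn't been counted yet, increment count_odd
--             count_odd += 1
--             # Mark the occurrence of the odd number in the dictionary
--             od[A[i]] = 1
--             # Check if the odd number is less than or equal to K, and if so, increment req_odd
--             if A[i] <= K:
--                 req_odd += 1
--         elif A[i] % 2 == 0 and ev.get(A[i], 0) == 0:
--             # If the number is even and hasn't been counted yet, increment count_even
--             count_even += 1
--             # Mark the occurrence of the even number in the dictionary
--             ev[A[i]] = 1
--             # Check if the even number is less than or equal to K, and if so, increment req_even
--             if A[i] <= K:
--                 req_even += 1
--
--     # Calculate the required counts to balance odd and even numbers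
--     count_odd = max(0, N // 2 - count_odd)
--     count_even = max(0, N // 2 - count_even)
--     req_even = K // 2 - req_even
--     req_odd = (K - K // 2) - req_odd
--
--     # Check if the requirements can be met, if not, return -1
--     if req_even < count_even or req_odd < count_odd:
--         return -1
--
--     # Calculate and return the absolute sum of count_even and count_odd
--     return abs(count_even + count_odd)
-- ===== SOURCE B (Python) =====
-- def min_updates(N, A, K):
--     if N % 2:
--         return -1
--     # Dedup by sorting: walk the sorted prefix once, skipping elements equal to
--     # the previous one; equal values are adjacent after sorting.
--     count_odd = count_even = req_odd = req_even = 0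
--     prev = None
--     for x in sorted(A[:max(0, N)]):
--         if x == prev:
--             continue
--         prev = x
--         if x % 2:
--             count_odd += 1
--             if x <= K:
--                 req_odd += 1
--         else:
--             count_even += 1
--             if x <= K:
--                 req_even += 1
--     need_odd = max(0, N // 2 - count_odd)
--     need_even = max(0, N // 2 - count_even)
--     if K // 2 - req_even < need_even or (K - K // 2) - req_odd < need_odd:
--         return -1
--     return need_even + need_odd
-- ===== Notes on version B (the rewrite author's own statement) =====
-- stated objective: alternative
-- what changed: Dedup by hashing is replaced by dedup by sorting: B sorts the first-N prefix and makes one adjacent-skip scan over it (x == prev) to count distinct odds/evens and those <= K, instead of A's unsorted pass that threads two occurrence dicts; the final arithmetic is the shared specification.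
import Mathlib
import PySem

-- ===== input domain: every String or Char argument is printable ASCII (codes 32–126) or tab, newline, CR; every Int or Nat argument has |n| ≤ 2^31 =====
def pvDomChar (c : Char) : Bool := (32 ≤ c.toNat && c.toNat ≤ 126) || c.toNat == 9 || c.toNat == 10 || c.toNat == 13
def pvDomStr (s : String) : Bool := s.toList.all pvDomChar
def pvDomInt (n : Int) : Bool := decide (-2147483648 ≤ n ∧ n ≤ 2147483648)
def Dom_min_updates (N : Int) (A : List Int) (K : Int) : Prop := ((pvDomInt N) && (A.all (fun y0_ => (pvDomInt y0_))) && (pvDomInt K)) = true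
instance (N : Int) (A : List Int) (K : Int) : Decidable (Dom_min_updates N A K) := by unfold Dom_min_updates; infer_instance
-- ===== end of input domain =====

-- B dedups by SORTING the first-N prefix and skipping adjacent equal elements in one scan,
-- instead of A's unsorted pass threading two occurrence dicts (objective: alternative).

-- ===== PORT A =====
-- loop state: (count_odd, count_even, req_odd, req_even, od, ev)
abbrev minUState : Type := Int × Int × Int × Int × PySem.Dict Int Int × PySem.Dict Int Int

def minUStep (K : Int) (s : minUState) (a : Int) : minUState :=
  match s with
  | (co, ce, ro, re, od, ev) =>
    if PySem.Int.mod a 2 ≠ 0 ∧ od.getD a 0 = 0 then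
      (co + 1, ce, (if a ≤ K then ro + 1 else ro), re, od.insert a 1, ev)
    else if PySem.Int.mod a 2 = 0 ∧ ev.getD a 0 = 0 then
      (co, ce + 1, ro, (if a ≤ K then re + 1 else re), od, ev.insert a 1)
    else (co, ce, ro, re, od, ev)

-- one iteration of 'for i in range(N)': none once A[i] has raised IndexError
def minULoopF (A : List Int) (K : Int) (st : Option minUState) (i : Int) : Option minUState :=
  match st with
  | none => none
  | some s =>
    match PySem.List.pyGet? A i with
    | none => none            -- A[i] raises IndexError here; excluded by Pre_min_updates
    | some a => some (minUStep K s a)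

def min_updates (N : Int) (A : List Int) (K : Int) : Int :=
  if PySem.Int.mod N 2 ≠ 0 then -1
  else
    match (PySem.List.pyRange 0 N 1).foldl (minULoopF A K)
        (some (0, 0, 0, 0, PySem.Dict.empty, PySem.Dict.empty)) with
    | none => 0                        -- unreachable inside Pre_min_updates (Python A raises)
    | some (co, ce, ro, re, _, _) =>
      let co' := max 0 (PySem.Int.floordiv N 2 - co)
      let ce' := max 0 (PySem.Int.floordiv N 2 - ce)
      let re' := PySem.Int.floordiv K 2 - re
      let ro' := (K - PySem.Int.floordiv K 2) - ro
      if re' < ce' ∨ ro' < co' then -1 else |ce' + co'|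

-- ===== PORT B =====
-- scan state: (count_odd, count_even, req_odd, req_even, prev)
abbrev altAcc : Type := Int × Int × Int × Int × Option Int

def altStep (K : Int) (s : altAcc) (x : Int) : altAcc :=
  match s with
  | (co, ce, ro, re, prev) =>
    if some x = prev then (co, ce, ro, re, prev)     -- 'if x == prev: continue'
    else if PySem.Int.mod x 2 ≠ 0 then
      (co + 1, ce, (if x ≤ K then ro + 1 else ro), re, some x)
    else
      (co, ce + 1, ro, (if x ≤ K then re + 1 else re), some x)

def min_updates_alt (N : Int) (A : List Int) (K : Int) : Int :=
  if PySem.Int.mod N 2 ≠ 0 then -1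
  else
    match (PySem.List.sorted (PySem.List.slice A none (some (max 0 N))) (fun x => x) false).foldl
        (altStep K) (0, 0, 0, 0, none) with
    | (co, ce, ro, re, _) =>
      let needOdd := max 0 (PySem.Int.floordiv N 2 - co)
      let needEven := max 0 (PySem.Int.floordiv N 2 - ce)
      if PySem.Int.floordiv K 2 - re < needEven ∨ (K - PySem.Int.floordiv K 2) - ro < needOdd then -1
      else needEven + needOdd

-- ===== PRECONDITION & SPEC =====
-- Pre_ excludes exactly the inputs where Python A raises IndexError: N even with N > len(A)
-- (the loop indexes A[i] for i in range(N)).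
def Pre_min_updates (N : Int) (A : List Int) (K : Int) : Prop :=
  PySem.Int.mod N 2 = 1 ∨ N ≤ (A.length : Int)
instance (N : Int) (A : List Int) (K : Int) : Decidable (Pre_min_updates N A K) := by
  unfold Pre_min_updates; infer_instance

def pvWitness_min_updates : Int × List Int × Int := (4, [1, 2, 3, 4], 4)

def Spec_min_updates (N : Int) (A : List Int) (K : Int) (out : Int) : Prop := out = min_updates_alt N A K
instance (N : Int) (A : List Int) (K : Int) (out : Int) : Decidable (Spec_min_updates N A K out) := by
  unfold Spec_min_updates; infer_instance

-- ===== CLAIM (what is proved, stated in full; the proofs are below) =====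
def Claim_equal_min_updates : Prop := ∀ (N : Int) (A : List Int) (K : Int), Dom_min_updates N A K → Pre_min_updates N A K → Spec_min_updates N A K (min_updates N A K)

-- ===== LEMMAS AND PROOFS =====

-- the four counts, as indicator sums over a list of distinct values
def cntO (l : List Int) : Int := (l.map (fun x => if PySem.Int.mod x 2 ≠ 0 then (1:Int) else 0)).sum
def cntE (l : List Int) : Int := (l.map (fun x => if PySem.Int.mod x 2 = 0 then (1:Int) else 0)).sum
def cntOK (K : Int) (l : List Int) : Int := (l.map (fun x => if PySem.Int.mod x 2 ≠ 0 ∧ x ≤ K then (1:Int) else 0)).sum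
def cntEK (K : Int) (l : List Int) : Int := (l.map (fun x => if PySem.Int.mod x 2 = 0 ∧ x ≤ K then (1:Int) else 0)).sum

-- ---------- A side: the dict loop counts the first occurrences ----------

-- the elements of `Set.update s l` that are new relative to the prefix `s`
def newElems (s : PySem.Set Int) (l : List Int) : List Int :=
  (PySem.Set.update s l).drop s.length

lemma update_prefix (s : PySem.Set Int) (l : List Int) :
    PySem.Set.update s l = s ++ newElems s l := by
  induction l generalizing s with
  | nil => simp [PySem.Set.update, newElems]
  | cons a t ih =>
    have hstep : PySem.Set.update s (a :: t) = PySem.Set.update (PySem.Set.add s a) t := rfl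
    by_cases h : PySem.Set.contains s a
    · have hadd : PySem.Set.add s a = s := by unfold PySem.Set.add; rw [if_pos h]
      rw [hstep, hadd, newElems, hstep, hadd]
      exact ih s
    · have hadd : PySem.Set.add s a = s ++ [a] := by unfold PySem.Set.add; rw [if_neg h]
      rw [hstep, hadd, newElems, hstep, hadd]
      have := ih (s ++ [a])
      rw [this]
      simp [newElems, List.drop_append]

lemma newElems_cons_mem (s : PySem.Set Int) (a : Int) (t : List Int)
    (h : PySem.Set.contains s a) :
    newElems s (a :: t) = newElems s t := by
  have hadd : PySem.Set.add s a = s := by unfold PySem.Set.add; rw [if_pos h]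
  simp [newElems, PySem.Set.update, hadd]

lemma newElems_cons_not_mem (s : PySem.Set Int) (a : Int) (t : List Int)
    (h : ¬ PySem.Set.contains s a) :
    newElems s (a :: t) = a :: newElems (s ++ [a]) t := by
  have hadd : PySem.Set.add s a = s ++ [a] := by unfold PySem.Set.add; rw [if_neg h]
  have hshape : PySem.Set.update (s ++ [a]) t = (s ++ [a]) ++ newElems (s ++ [a]) t :=
    update_prefix _ _
  have : PySem.Set.update s (a :: t) = PySem.Set.update (s ++ [a]) t := by
    simp [PySem.Set.update, hadd]
  rw [newElems, this, hshape]
  simp [List.drop_append]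

-- A's loop, run on the list of processed elements, adds exactly the counts of the new
-- distinct elements; the dicts od/ev record exactly the odd/even elements already seen (set s).
lemma loop_counts (K : Int) (l : List Int) : ∀ (s : PySem.Set Int) (co ce ro re : Int)
    (od ev : PySem.Dict Int Int)
    (hod : ∀ x : Int, PySem.Int.mod x 2 ≠ 0 → (od.getD x 0 = 0 ↔ ¬ PySem.Set.contains s x))
    (hev : ∀ x : Int, PySem.Int.mod x 2 = 0 → (ev.getD x 0 = 0 ↔ ¬ PySem.Set.contains s x)),
    ∃ od' ev', l.foldl (minUStep K) (co, ce, ro, re, od, ev) =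
      (co + cntO (newElems s l), ce + cntE (newElems s l),
       ro + cntOK K (newElems s l), re + cntEK K (newElems s l), od', ev') := by
  induction l with
  | nil =>
    intro s co ce ro re od ev _ _
    exact ⟨od, ev, by simp [newElems, PySem.Set.update, cntO, cntE, cntOK, cntEK]⟩
  | cons a t ih =>
    intro s co ce ro re od ev hod hev
    by_cases hpar : PySem.Int.mod a 2 = 0
    · -- even element
      by_cases hseen : PySem.Set.contains s a
      · -- already seen: state unchanged
        have h1 : ¬ (PySem.Int.mod a 2 ≠ 0 ∧ od.getD a 0 = 0) := by tauto
        have h2 : ¬ (PySem.Int.mod a 2 = 0 ∧ ev.getD a 0 = 0) := by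
          intro ⟨_, h⟩; exact ((hev a hpar).mp h) hseen
        have hstep : minUStep K (co, ce, ro, re, od, ev) a = (co, ce, ro, re, od, ev) := by
          simp only [minUStep]; rw [if_neg h1, if_neg h2]
        rw [List.foldl_cons, hstep, newElems_cons_mem s a t hseen]
        exact ih s co ce ro re od ev hod hev
      · -- new even element
        have hev0 : ev.getD a 0 = 0 := (hev a hpar).mpr hseen
        have h1 : ¬ (PySem.Int.mod a 2 ≠ 0 ∧ od.getD a 0 = 0) := by tauto
        have hstep : minUStep K (co, ce, ro, re, od, ev) a =
            (co, ce + 1, ro, (if a ≤ K then re + 1 else re), od, ev.insert a 1) := by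
          simp only [minUStep]; rw [if_neg h1, if_pos ⟨hpar, hev0⟩]
        have hod' : ∀ x : Int, PySem.Int.mod x 2 ≠ 0 →
            (od.getD x 0 = 0 ↔ ¬ PySem.Set.contains (s ++ [a]) x) := by
          intro x hx
          have hne : x ≠ a := by intro h; subst h; exact hx hpar
          rw [hod x hx]
          simp [PySem.Set.contains, List.contains_append, hne]
        have hev' : ∀ x : Int, PySem.Int.mod x 2 = 0 →
            ((ev.insert a 1).getD x 0 = 0 ↔ ¬ PySem.Set.contains (s ++ [a]) x) := by
          intro x hx
          rw [PySem.Dict.getD_insert]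
          by_cases hxa : x = a
          · subst hxa; simp [PySem.Set.contains, List.contains_append]
          · rw [if_neg hxa, hev x hx]
            simp [PySem.Set.contains, List.contains_append, hxa]
        obtain ⟨od', ev', hrec⟩ := ih (s ++ [a]) co (ce + 1) ro
          (if a ≤ K then re + 1 else re) od (ev.insert a 1) hod' hev'
        refine ⟨od', ev', ?_⟩
        rw [List.foldl_cons, hstep, hrec, newElems_cons_not_mem s a t hseen]
        simp only [cntO, cntE, cntOK, cntEK, List.map_cons, List.sum_cons]
        have hne : ¬ (PySem.Int.mod a 2 ≠ 0) := not_not_intro hpar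
        have hneK : ¬ (PySem.Int.mod a 2 ≠ 0 ∧ a ≤ K) := fun h => h.1 hpar
        refine Prod.ext ?_ (Prod.ext ?_ (Prod.ext ?_ (Prod.ext ?_ rfl)))
        · rw [if_neg hne]; ring
        · rw [if_pos hpar]; ring
        · rw [if_neg hneK]; ring
        · by_cases hK : a ≤ K
          · have hpK : PySem.Int.mod a 2 = 0 ∧ a ≤ K := ⟨hpar, hK⟩
            rw [if_pos hK, if_pos hpK]; ring
          · have hnK : ¬ (PySem.Int.mod a 2 = 0 ∧ a ≤ K) := fun h => hK h.2
            rw [if_neg hK, if_neg hnK]; ring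
    · -- odd element
      by_cases hseen : PySem.Set.contains s a
      · have h1 : ¬ (PySem.Int.mod a 2 ≠ 0 ∧ od.getD a 0 = 0) := by
          intro ⟨_, h⟩; exact ((hod a hpar).mp h) hseen
        have hstep : minUStep K (co, ce, ro, re, od, ev) a = (co, ce, ro, re, od, ev) := by
          simp only [minUStep]; rw [if_neg h1, if_neg (by tauto)]
        rw [List.foldl_cons, hstep, newElems_cons_mem s a t hseen]
        exact ih s co ce ro re od ev hod hev
      · have hod0 : od.getD a 0 = 0 := (hod a hpar).mpr hseen
        have hstep : minUStep K (co, ce, ro, re, od, ev) a =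
            (co + 1, ce, (if a ≤ K then ro + 1 else ro), re, od.insert a 1, ev) := by
          simp only [minUStep]; rw [if_pos ⟨hpar, hod0⟩]
        have hod' : ∀ x : Int, PySem.Int.mod x 2 ≠ 0 →
            ((od.insert a 1).getD x 0 = 0 ↔ ¬ PySem.Set.contains (s ++ [a]) x) := by
          intro x hx
          rw [PySem.Dict.getD_insert]
          by_cases hxa : x = a
          · subst hxa; simp [PySem.Set.contains, List.contains_append]
          · rw [if_neg hxa, hod x hx]
            simp [PySem.Set.contains, List.contains_append, hxa]
        have hev' : ∀ x : Int, PySem.Int.mod x 2 = 0 →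
            (ev.getD x 0 = 0 ↔ ¬ PySem.Set.contains (s ++ [a]) x) := by
          intro x hx
          have hne : x ≠ a := by intro h; subst h; exact hpar hx
          rw [hev x hx]
          simp [PySem.Set.contains, List.contains_append, hne]
        obtain ⟨od', ev', hrec⟩ := ih (s ++ [a]) (co + 1) ce
          (if a ≤ K then ro + 1 else ro) re (od.insert a 1) ev hod' hev'
        refine ⟨od', ev', ?_⟩
        rw [List.foldl_cons, hstep, hrec, newElems_cons_not_mem s a t hseen]
        simp only [cntO, cntE, cntOK, cntEK, List.map_cons, List.sum_cons]
        have hne : PySem.Int.mod a 2 ≠ 0 := hpar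
        have hnE : ¬ (PySem.Int.mod a 2 = 0 ∧ a ≤ K) := fun h => hpar h.1
        refine Prod.ext ?_ (Prod.ext ?_ (Prod.ext ?_ (Prod.ext ?_ rfl)))
        · rw [if_pos hne]; ring
        · rw [if_neg hpar]; ring
        · by_cases hK : a ≤ K
          · have hpK : PySem.Int.mod a 2 ≠ 0 ∧ a ≤ K := ⟨hne, hK⟩
            rw [if_pos hK, if_pos hpK]; ring
          · have hnK : ¬ (PySem.Int.mod a 2 ≠ 0 ∧ a ≤ K) := fun h => hK h.2
            rw [if_neg hK, if_neg hnK]; ring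
        · rw [if_neg hnE]; ring

-- A's index loop over range(n) is the element loop over the first n elements
lemma range_fold_eq_take (A : List Int) (K : Int) (n : Nat) (hn : n ≤ A.length) :
    (PySem.List.pyRange 0 (n : Int) 1).foldl (minULoopF A K)
      (some (0, 0, 0, 0, PySem.Dict.empty, PySem.Dict.empty))
    = some ((A.take n).foldl (minUStep K)
        (0, 0, 0, 0, PySem.Dict.empty, PySem.Dict.empty)) := by
  induction n with
  | zero =>
    rw [PySem.List.pyRange_zero_natCast]
    rfl
  | succ m ih =>
    have hm : m ≤ A.length := Nat.le_of_succ_le hn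
    have hmlt : m < A.length := hn
    rw [PySem.List.pyRange_zero_natCast] at ih ⊢
    rw [List.range_succ, List.map_append, List.foldl_append, ih hm]
    have hget : PySem.List.pyGet? A ((m : Nat) : Int) = some A[m] := by
      rw [PySem.List.pyGet?_natCast]
      simp [hmlt]
    have htake : A.take (m + 1) = A.take m ++ [A[m]] := by
      rw [List.take_succ]
      simp [hmlt]
    rw [htake, List.foldl_append]
    simp only [List.map_cons, List.map_nil, List.foldl_cons, List.foldl_nil, minULoopF, hget]

-- ---------- B side: adjacent-skip scan over the sorted prefix ----------

-- the elements B's scan keeps: adjacent dedup relative to the running 'prev'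
def dedupAdj : Option Int → List Int → List Int
  | _, [] => []
  | prev, x :: t => if some x = prev then dedupAdj prev t else x :: dedupAdj (some x) t

lemma alt_fold (K : Int) (l : List Int) : ∀ (prev : Option Int) (co ce ro re : Int),
    ∃ p, l.foldl (altStep K) (co, ce, ro, re, prev) =
      (co + cntO (dedupAdj prev l), ce + cntE (dedupAdj prev l),
       ro + cntOK K (dedupAdj prev l), re + cntEK K (dedupAdj prev l), p) := by
  induction l with
  | nil => intro prev co ce ro re; exact ⟨prev, by simp [dedupAdj, cntO, cntE, cntOK, cntEK]⟩
  | cons a t ih =>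
    intro prev co ce ro re
    by_cases hskip : some a = prev
    · have hstep : altStep K (co, ce, ro, re, prev) a = (co, ce, ro, re, prev) := by
        simp only [altStep]; rw [if_pos hskip]
      obtain ⟨p, hrec⟩ := ih prev co ce ro re
      exact ⟨p, by rw [List.foldl_cons, hstep, hrec, dedupAdj, if_pos hskip]⟩
    · by_cases hpar : PySem.Int.mod a 2 = 0
      · have hstep : altStep K (co, ce, ro, re, prev) a =
            (co, ce + 1, ro, (if a ≤ K then re + 1 else re), some a) := by
          simp only [altStep]; rw [if_neg hskip, if_neg (not_not_intro hpar)]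
        obtain ⟨p, hrec⟩ := ih (some a) co (ce + 1) ro (if a ≤ K then re + 1 else re)
        refine ⟨p, ?_⟩
        rw [List.foldl_cons, hstep, hrec, dedupAdj, if_neg hskip]
        simp only [cntO, cntE, cntOK, cntEK, List.map_cons, List.sum_cons]
        refine Prod.ext ?_ (Prod.ext ?_ (Prod.ext ?_ (Prod.ext ?_ rfl))) <;>
          split_ifs <;> first | ring1 | tauto
      · have hstep : altStep K (co, ce, ro, re, prev) a =
            (co + 1, ce, (if a ≤ K then ro + 1 else ro), re, some a) := by
          simp only [altStep]; rw [if_neg hskip, if_pos hpar]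
        obtain ⟨p, hrec⟩ := ih (some a) (co + 1) ce (if a ≤ K then ro + 1 else ro) re
        refine ⟨p, ?_⟩
        rw [List.foldl_cons, hstep, hrec, dedupAdj, if_neg hskip]
        simp only [cntO, cntE, cntOK, cntEK, List.map_cons, List.sum_cons]
        refine Prod.ext ?_ (Prod.ext ?_ (Prod.ext ?_ (Prod.ext ?_ rfl))) <;>
          split_ifs <;> first | ring1 | tauto

lemma dedupAdj_subset (x : Int) : ∀ (l : List Int) (prev : Option Int),
    x ∈ dedupAdj prev l → x ∈ l := by
  intro l
  induction l with
  | nil => intro prev h; simpa [dedupAdj] using h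
  | cons a t ih =>
    intro prev h
    by_cases hskip : some a = prev
    · rw [dedupAdj, if_pos hskip] at h
      exact List.mem_cons_of_mem a (ih prev h)
    · rw [dedupAdj, if_neg hskip] at h
      rcases List.mem_cons.mp h with h | h
      · exact h ▸ List.mem_cons_self
      · exact List.mem_cons_of_mem a (ih (some a) h)

lemma mem_dedupAdj_of (x : Int) : ∀ (l : List Int) (prev : Option Int),
    x ∈ l → some x ≠ prev → x ∈ dedupAdj prev l := by
  intro l
  induction l with
  | nil => intro prev h _; simp at h
  | cons a t ih =>
    intro prev hm hne
    by_cases hskip : some a = prev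
    · rw [dedupAdj, if_pos hskip]
      rcases List.mem_cons.mp hm with h | h
      · exact absurd (h ▸ hskip) hne
      · exact ih prev h hne
    · rw [dedupAdj, if_neg hskip]
      by_cases hxa : x = a
      · exact hxa ▸ List.mem_cons_self
      · rcases List.mem_cons.mp hm with h | h
        · exact absurd h hxa
        · exact List.mem_cons_of_mem a (ih (some a) h (by simpa using hxa))

-- on a sorted tail lying at or above p, the kept elements strictly exceed p and are strictly sorted
lemma dedupAdj_some_sorted : ∀ (l : List Int) (p : Int), l.Pairwise (· ≤ ·) →
    (∀ y ∈ l, p ≤ y) →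
    (dedupAdj (some p) l).Pairwise (· < ·) ∧ ∀ y ∈ dedupAdj (some p) l, p < y := by
  intro l
  induction l with
  | nil => intro p _ _; simp [dedupAdj]
  | cons a t ih =>
    intro p hpw hge
    have ha : ∀ y ∈ t, a ≤ y := fun y hy => List.rel_of_pairwise_cons hpw hy
    have hpt : t.Pairwise (· ≤ ·) := hpw.of_cons
    by_cases hskip : (some a : Option Int) = some p
    · have hap : a = p := by injection hskip
      rw [dedupAdj, if_pos hskip]
      exact ih p hpt (fun y hy => hap ▸ ha y hy)
    · have hpa : p < a := by
        have h1 : p ≤ a := hge a List.mem_cons_self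
        have h2 : a ≠ p := fun h => hskip (by rw [h])
        omega
      rw [dedupAdj, if_neg hskip]
      obtain ⟨hpw', hgt'⟩ := ih a hpt ha
      constructor
      · exact List.Pairwise.cons (fun y hy => hgt' y hy) hpw'
      · intro y hy
        rcases List.mem_cons.mp hy with h | h
        · subst h; exact hpa
        · exact lt_trans hpa (hgt' y h)

lemma dedupAdj_none_sorted (l : List Int) (h : l.Pairwise (· ≤ ·)) :
    (dedupAdj none l).Pairwise (· < ·) := by
  cases l with
  | nil => simp [dedupAdj]
  | cons a t =>
    have : dedupAdj none (a :: t) = a :: dedupAdj (some a) t := by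
      rw [dedupAdj, if_neg (by simp)]
    rw [this]
    obtain ⟨hpw, hgt⟩ := dedupAdj_some_sorted t a h.of_cons (fun y hy => List.rel_of_pairwise_cons h hy)
    exact List.Pairwise.cons (fun y hy => hgt y hy) hpw

-- the scanned dedup of the sorted prefix is a permutation of A's first-occurrence set
lemma dedupAdj_perm_ofList (l : List Int) :
    (dedupAdj none (PySem.List.sorted l (fun x => x) false)).Perm (PySem.Set.ofList l) := by
  have hs : (PySem.List.sorted l (fun x => x) false).Pairwise (· ≤ ·) :=
    PySem.List.sorted_pairwise l (fun x => x)
  have hnd : (dedupAdj none (PySem.List.sorted l (fun x => x) false)).Nodup :=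
    (dedupAdj_none_sorted _ hs).imp (fun h => ne_of_lt h)
  refine (List.perm_ext_iff_of_nodup hnd (PySem.Set.nodup_ofList l)).mpr (fun x => ?_)
  rw [PySem.Set.mem_ofList]
  constructor
  · intro h
    have := dedupAdj_subset x _ none h
    rwa [PySem.List.mem_sorted] at this
  · intro h
    exact mem_dedupAdj_of x _ none (by rwa [PySem.List.mem_sorted]) (by simp)

lemma cnt_perm (f : Int → Int) {l₁ l₂ : List Int} (h : l₁.Perm l₂) :
    (l₁.map f).sum = (l₂.map f).sum := (h.map f).sum_eq

-- ===== VERDICT (by name: the statement is the Claim_ definition above) =====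
theorem min_updates_spec : Claim_equal_min_updates := by
  intro N A K _ hpre
  unfold Spec_min_updates min_updates min_updates_alt
  by_cases hodd : PySem.Int.mod N 2 ≠ 0
  · rw [if_pos hodd, if_pos hodd]
  · push_neg at hodd
    have hN : N ≤ (A.length : Int) := by
      rcases hpre with h | h
      · rw [hodd] at h; omega
      · exact h
    rw [if_neg (fun h => h hodd), if_neg (fun h => h hodd)]
    simp only []
    have hn : N.toNat ≤ A.length := by omega
    have hrange_eq : PySem.List.pyRange 0 N 1 = PySem.List.pyRange 0 ((N.toNat : Nat) : Int) 1 := by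
      by_cases hneg : N < 0
      · rw [show N.toNat = 0 by omega]
        rw [PySem.List.pyRange_zero_natCast]
        simp [PySem.List.pyRange]; omega
      · rw [show ((N.toNat : Nat) : Int) = N by omega]
    have hmax : max 0 N = ((N.toNat : Nat) : Int) := by omega
    have hslice : PySem.List.slice A none (some ((N.toNat : Nat) : Int)) = A.take N.toNat := by
      rw [PySem.List.slice_to (xs := A) (b := ((N.toNat : Nat) : Int)) (by omega)]
      simp
      omega
    rw [hrange_eq, range_fold_eq_take A K N.toNat hn, hmax, hslice]
    -- A side
    obtain ⟨od', ev', hloop⟩ := loop_counts K (A.take N.toNat) [] 0 0 0 0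
      PySem.Dict.empty PySem.Dict.empty
      (by intro x _; simp [pysem, PySem.Set.contains])
      (by intro x _; simp [pysem, PySem.Set.contains])
    rw [hloop]
    have hnew : newElems [] (A.take N.toNat) = PySem.Set.ofList (A.take N.toNat) := by
      rw [PySem.Set.ofList_eq_foldl, newElems]
      simp [PySem.Set.update]
    rw [hnew]
    -- B side
    obtain ⟨p, hfold⟩ := alt_fold K (PySem.List.sorted (A.take N.toNat) (fun x => x) false)
      none 0 0 0 0
    rw [hfold]
    have hperm := dedupAdj_perm_ofList (A.take N.toNat)
    set d := dedupAdj none (PySem.List.sorted (A.take N.toNat) (fun x => x) false) with hd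
    set S := PySem.Set.ofList (A.take N.toNat) with hS
    have hO : cntO d = cntO S := cnt_perm _ hperm
    have hE : cntE d = cntE S := cnt_perm _ hperm
    have hOK : cntOK K d = cntOK K S := cnt_perm _ hperm
    have hEK : cntEK K d = cntEK K S := cnt_perm _ hperm
    rw [hO, hE, hOK, hEK]
    simp only [zero_add]
    set co' := max 0 (PySem.Int.floordiv N 2 - cntO S) with hco'
    set ce' := max 0 (PySem.Int.floordiv N 2 - cntE S) with hce'
    by_cases hcond : PySem.Int.floordiv K 2 - cntEK K S < ce' ∨
        (K - PySem.Int.floordiv K 2) - cntOK K S < co'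
    · rw [if_pos hcond, if_pos hcond]
    · rw [if_neg hcond, if_neg hcond]
      have h1 : 0 ≤ ce' := le_max_left _ _
      have h2 : 0 ≤ co' := le_max_left _ _
      rw [abs_of_nonneg (by omega)]
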